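-- pv_equiv track=rewrite | github.com/martinventer/supreme-lamp | Mesher.py | make_hex_grid
-- ===== SOURCE A (Python) =====
-- def make_hex_grid(dimension) -> dict:
--     """
--     Create a dictionary of hexagonal grid elements.
--     :param dimension: int
--         radial dimension for the regular hex grid
--     :return: dict
--         {element_ID: [x-coord, y-coord, z-coord], }
--     """
--     coord_list = list()
--     for x in range(-1 * dimension, dimension + 1, 1):
--         for y in range(-1 * dimension, dimension + 1, 1):
--             for z in range(-1 * dimension, dimension + 1, 1):
--                 if sum([x, y, z]) is 0:
--                     coord_list.append([x, y, z])
--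
--     return {element_id: coord for element_id, coord in enumerate(coord_list)}
-- ===== SOURCE B (Python) =====
-- def make_hex_grid(dimension) -> dict:
--     """Same result as A, but O(d^2): z is determined as -(x+y); just range-check it."""
--     coords = {}
--     element_id = 0
--     for x in range(-dimension, dimension + 1):
--         for y in range(-dimension, dimension + 1):
--             z = -(x + y)
--             if -dimension <= z <= dimension:
--                 coords[element_id] = [x, y, z]
--                 element_id += 1
--     return coords
-- ===== Notes on version B (the rewrite author's own statement) =====
-- stated objective: faster
-- what changed: The inner loop over z is removed: z is computed as -(x+y) and range-checked, turning the triple scan into a double scan.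
import Mathlib
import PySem

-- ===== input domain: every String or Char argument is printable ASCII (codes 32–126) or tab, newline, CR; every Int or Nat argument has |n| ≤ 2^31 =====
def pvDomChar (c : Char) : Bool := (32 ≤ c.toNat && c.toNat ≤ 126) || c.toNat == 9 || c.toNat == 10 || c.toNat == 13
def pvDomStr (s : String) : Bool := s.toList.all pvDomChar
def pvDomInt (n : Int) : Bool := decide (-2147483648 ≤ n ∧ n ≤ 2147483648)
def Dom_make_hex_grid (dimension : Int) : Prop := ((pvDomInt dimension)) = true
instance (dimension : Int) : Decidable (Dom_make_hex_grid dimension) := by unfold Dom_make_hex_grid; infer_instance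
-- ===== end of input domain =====

-- B drops A's inner z-loop: z = -(x+y) is range-checked instead (O(d^2) vs O(d^3)); same return value.

-- ===== PORT A =====
-- literal port: triple loop over range(-dimension, dimension+1), keep [x,y,z] when sum is 0;
-- the final dict comprehension over enumerate has distinct int keys, so as an association
-- list in insertion order it IS `enumerate coord_list 0`.
def make_hex_grid (dimension : Int) : List (Int × List Int) :=
  let coord_list : List (List Int) :=
    (PySem.List.pyRange (-1 * dimension) (dimension + 1) 1).foldl (fun acc x =>
      (PySem.List.pyRange (-1 * dimension) (dimension + 1) 1).foldl (fun acc y =>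
        (PySem.List.pyRange (-1 * dimension) (dimension + 1) 1).foldl (fun acc z =>
          if List.sum [x, y, z] = 0 then acc ++ [[x, y, z]] else acc) acc) acc) []
  PySem.List.enumerate coord_list 0

-- ===== PORT B =====
-- literal port of Source B: state (coords, element_id); coords[element_id] = … with a fresh
-- integer key each time appends to the association list.
def make_hex_grid_alt (dimension : Int) : List (Int × List Int) :=
  let r := PySem.List.pyRange (-dimension) (dimension + 1) 1
  let st :=
    r.foldl (fun st x =>
      r.foldl (fun st y =>
        let z := -(x + y)
        if -dimension ≤ z ∧ z ≤ dimension then (st.1 ++ [(st.2, [x, y, z])], st.2 + 1)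
        else st) st) (([] : List (Int × List Int)), (0 : Int))
  st.1

-- ===== PRECONDITION & SPEC =====
def Spec_make_hex_grid (dimension : Int) (out : List (Int × List Int)) : Prop := out = make_hex_grid_alt dimension
instance (dimension : Int) (out : List (Int × List Int)) : Decidable (Spec_make_hex_grid dimension out) := by unfold Spec_make_hex_grid; infer_instance

-- ===== CLAIM (what is proved, stated in full; the proofs are below) =====
def Claim_equal_make_hex_grid : Prop := ∀ (dimension : Int), Dom_make_hex_grid dimension → Spec_make_hex_grid dimension (make_hex_grid dimension)

-- ===== LEMMAS AND PROOFS =====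

-- filter for a single value on a duplicate-free list
lemma filter_eq_singleton_of_nodup (l : List Int) (c : Int) (h : l.Nodup) :
    l.filter (fun z => z = c) = if c ∈ l then [c] else [] := by
  rw [List.filter_eq]
  by_cases hc : c ∈ l
  · simp [hc, List.count_eq_one_of_mem h hc]
  · simp [hc, List.count_eq_zero_of_not_mem hc]

-- enumerate distributes over append
lemma enumerate_append (u v : List (List Int)) (n : Int) :
    PySem.List.enumerate (u ++ v) n
      = PySem.List.enumerate u n ++ PySem.List.enumerate v (n + u.length) := by
  induction u generalizing n with
  | nil => simp [PySem.List.enumerate_nil]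
  | cons a u ih =>
      simp [PySem.List.enumerate_cons, ih (n + 1)]
      ring_nf

-- B's loop shape: a fold whose step appends the enumeration of a per-element block
lemma foldl_enum {α : Type} (g : α → List (List Int))
    (step : (List (Int × List Int) × Int) → α → (List (Int × List Int) × Int))
    (hstep : ∀ st a, step st a = (st.1 ++ PySem.List.enumerate (g a) st.2, st.2 + (g a).length))
    (L : List α) (l : List (Int × List Int)) (n : Int) :
    L.foldl step (l, n)
      = (l ++ PySem.List.enumerate (L.flatMap g) n, n + ((L.flatMap g).length : Int)) := by
  induction L generalizing l n with
  | nil => simp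
  | cons a L ih =>
      simp only [List.foldl_cons, hstep, ih, List.flatMap_cons, enumerate_append,
        List.length_append, List.append_assoc]
      simp only [Prod.mk.injEq, true_and]
      push_cast; ring

-- the per-(x,y) block both programs produce
def hexBlock (d x y : Int) : List (List Int) :=
  if -d ≤ -(x + y) ∧ -(x + y) ≤ d then [[x, y, -(x + y)]] else []

-- A's innermost z-loop produces exactly that block
lemma A_inner (d x y : Int) (acc : List (List Int)) :
    (PySem.List.pyRange (-1 * d) (d + 1) 1).foldl (fun acc z =>
        if List.sum [x, y, z] = 0 then acc ++ [[x, y, z]] else acc) acc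
      = acc ++ hexBlock d x y := by
  have : ∀ acc, (PySem.List.pyRange (-1 * d) (d + 1) 1).foldl (fun acc z =>
        if List.sum [x, y, z] = 0 then acc ++ [[x, y, z]] else acc) acc
      = acc ++ ((PySem.List.pyRange (-1 * d) (d + 1) 1).filter
          (fun z => decide (List.sum [x, y, z] = 0))).map (fun z => [x, y, z]) := by
    intro acc
    have := PySem.List.foldl_append_if (fun z => decide (List.sum [x, y, z] = 0))
      (fun z => [x, y, z]) (PySem.List.pyRange (-1 * d) (d + 1) 1) acc
    simpa using this
  rw [this]
  congr 1
  have hfc : (PySem.List.pyRange (-1 * d) (d + 1) 1).filter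
        (fun z => decide (List.sum [x, y, z] = 0))
      = (PySem.List.pyRange (-1 * d) (d + 1) 1).filter (fun z => z = -(x + y)) := by
    apply List.filter_congr
    intro z _
    simp only [List.sum_cons, List.sum_nil, decide_eq_decide]
    omega
  rw [hfc, filter_eq_singleton_of_nodup _ _ (PySem.List.nodup_pyRange_one _ _)]
  unfold hexBlock
  simp only [PySem.List.mem_pyRange_one]
  split_ifs with h1 h2 h2
  · simp
  · exact absurd h1 (by omega)
  · exact absurd h2 (by omega)
  · rfl

-- A's coord_list is the flat concatenation of the blocks
lemma A_coord_list (d : Int) :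
    (PySem.List.pyRange (-1 * d) (d + 1) 1).foldl (fun acc x =>
      (PySem.List.pyRange (-1 * d) (d + 1) 1).foldl (fun acc y =>
        (PySem.List.pyRange (-1 * d) (d + 1) 1).foldl (fun acc z =>
          if List.sum [x, y, z] = 0 then acc ++ [[x, y, z]] else acc) acc) acc) []
      = (PySem.List.pyRange (-1 * d) (d + 1) 1).flatMap (fun x =>
          (PySem.List.pyRange (-1 * d) (d + 1) 1).flatMap (fun y => hexBlock d x y)) := by
  have hy : ∀ x acc, (PySem.List.pyRange (-1 * d) (d + 1) 1).foldl (fun acc y =>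
        (PySem.List.pyRange (-1 * d) (d + 1) 1).foldl (fun acc z =>
          if List.sum [x, y, z] = 0 then acc ++ [[x, y, z]] else acc) acc) acc
      = acc ++ (PySem.List.pyRange (-1 * d) (d + 1) 1).flatMap (fun y => hexBlock d x y) := by
    intro x acc
    calc (PySem.List.pyRange (-1 * d) (d + 1) 1).foldl (fun acc y =>
        (PySem.List.pyRange (-1 * d) (d + 1) 1).foldl (fun acc z =>
          if List.sum [x, y, z] = 0 then acc ++ [[x, y, z]] else acc) acc) acc
        = (PySem.List.pyRange (-1 * d) (d + 1) 1).foldl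
            (fun acc y => acc ++ hexBlock d x y) acc := by
          exact PySem.List.foldl_congr_mem _ _ _ acc
            (fun acc y _ => A_inner d x y acc)
      _ = acc ++ (PySem.List.pyRange (-1 * d) (d + 1) 1).flatMap (fun y => hexBlock d x y) :=
          PySem.List.foldl_append_eq_flatMap _ _ acc
  calc _ = (PySem.List.pyRange (-1 * d) (d + 1) 1).foldl (fun acc x =>
            acc ++ (PySem.List.pyRange (-1 * d) (d + 1) 1).flatMap
              (fun y => hexBlock d x y)) [] := by
          exact PySem.List.foldl_congr_mem _ _ _ []
            (fun acc x _ => hy x acc)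
    _ = _ := by
          have := PySem.List.foldl_append_eq_flatMap (fun x =>
            (PySem.List.pyRange (-1 * d) (d + 1) 1).flatMap (fun y => hexBlock d x y))
            (PySem.List.pyRange (-1 * d) (d + 1) 1) []
          simpa using this

-- B equals the enumeration of the same flat list
lemma B_eq_enum (d : Int) :
    make_hex_grid_alt d
      = PySem.List.enumerate
          ((PySem.List.pyRange (-d) (d + 1) 1).flatMap (fun x =>
            (PySem.List.pyRange (-d) (d + 1) 1).flatMap (fun y => hexBlock d x y))) 0 := by
  unfold make_hex_grid_alt
  have hinner : ∀ x (st : List (Int × List Int) × Int),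
      (PySem.List.pyRange (-d) (d + 1) 1).foldl (fun st y =>
          let z := -(x + y)
          if -d ≤ z ∧ z ≤ d then (st.1 ++ [(st.2, [x, y, z])], st.2 + 1) else st) st
        = (st.1 ++ PySem.List.enumerate
            ((PySem.List.pyRange (-d) (d + 1) 1).flatMap (fun y => hexBlock d x y)) st.2,
           st.2 + (((PySem.List.pyRange (-d) (d + 1) 1).flatMap
             (fun y => hexBlock d x y)).length : Int)) := by
    intro x st
    have := foldl_enum (fun y => hexBlock d x y)
      (fun st y =>
          let z := -(x + y)
          if -d ≤ z ∧ z ≤ d then (st.1 ++ [(st.2, [x, y, z])], st.2 + 1) else st)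
      (fun st y => by
        unfold hexBlock
        dsimp only
        split_ifs with h
        · simp [PySem.List.enumerate_cons, PySem.List.enumerate_nil]
        · simp)
      (PySem.List.pyRange (-d) (d + 1) 1) st.1 st.2
    simpa using this
  have := foldl_enum (fun x => (PySem.List.pyRange (-d) (d + 1) 1).flatMap
      (fun y => hexBlock d x y))
    (fun st x =>
      (PySem.List.pyRange (-d) (d + 1) 1).foldl (fun st y =>
          let z := -(x + y)
          if -d ≤ z ∧ z ≤ d then (st.1 ++ [(st.2, [x, y, z])], st.2 + 1) else st) st)
    (fun st x => hinner x st)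
    (PySem.List.pyRange (-d) (d + 1) 1) [] 0
  simp only [this]
  simp

-- ===== VERDICT (by name: the statement is the Claim_ definition above) =====
theorem make_hex_grid_spec : Claim_equal_make_hex_grid := by
  intro d _
  unfold Spec_make_hex_grid
  rw [B_eq_enum]
  unfold make_hex_grid
  rw [A_coord_list]
  have : (-1 : Int) * d = -d := by ring
  rw [this]
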